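-- pv_equiv track=rewrite | github.com/KawaiYung/RegioMix | datasets/rcc_dataset_pos_mimic.py | get_group_indices
-- ===== SOURCE A (Python) =====
-- def get_group_indices(ans_loc_dict, detection_dict):
--     # Convert the values of ans_loc_dict to a list for easy indexing
--     ans_loc_values = list(ans_loc_dict.values())
--
--     group_indices = []
--     for detection_key in detection_dict:
--         # Get the group of the current detection_dict key
--         group = detection_dict[detection_key]
--
--         # Find all indices in ans_loc_dict that have the same group
--         indices = [i for i, v in enumerate(ans_loc_values) if v == group]
--
--         # Append the indices to the group_indices list
--         group_indices.append(indices)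
--
--     return group_indices
-- ===== SOURCE B (Python) =====
-- def get_group_indices(ans_loc_dict, detection_dict):
--     # Build group -> indices once, then one lookup per detection key.
--     by_group = {}
--     for i, v in enumerate(ans_loc_dict.values()):
--         by_group.setdefault(v, []).append(i)
--     return [by_group.get(g, []) for g in detection_dict.values()]
-- ===== Notes on version B (the rewrite author's own statement) =====
-- stated objective: faster
-- what changed: Instead of rescanning all ans_loc values for every detection key, B builds a group->indices dict in one pass and answers each detection key by a single lookup.
import Mathlib
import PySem

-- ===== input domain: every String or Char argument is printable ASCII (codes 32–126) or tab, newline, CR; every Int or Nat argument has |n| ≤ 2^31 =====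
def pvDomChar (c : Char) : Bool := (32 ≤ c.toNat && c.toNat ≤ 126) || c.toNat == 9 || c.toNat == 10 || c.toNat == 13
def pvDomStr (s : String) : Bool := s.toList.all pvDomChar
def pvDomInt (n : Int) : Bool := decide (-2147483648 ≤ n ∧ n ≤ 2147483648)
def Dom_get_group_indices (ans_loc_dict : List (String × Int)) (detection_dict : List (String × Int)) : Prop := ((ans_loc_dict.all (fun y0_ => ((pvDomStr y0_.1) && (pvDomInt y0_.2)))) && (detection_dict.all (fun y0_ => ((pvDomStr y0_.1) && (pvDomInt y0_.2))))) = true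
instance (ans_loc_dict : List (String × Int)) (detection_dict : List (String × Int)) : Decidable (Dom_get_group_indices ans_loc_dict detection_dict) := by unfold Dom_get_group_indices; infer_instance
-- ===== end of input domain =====

-- ===== PORT A =====
-- B replaces A's per-detection rescan of ans_loc values by a group->indices dict built once (faster).
def get_group_indices (ans_loc_dict : List (String × Int)) (detection_dict : List (String × Int)) : List (List Int) :=
  let ans_loc_values := ans_loc_dict.map Prod.snd
  detection_dict.foldl
    (fun group_indices kv =>
      let group := kv.2
      let indices := ((PySem.List.enumerate ans_loc_values).filter (fun iv => iv.2 == group)).map (·.1)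
      group_indices ++ [indices])
    []

-- ===== PORT B =====
def get_group_indices_alt (ans_loc_dict : List (String × Int)) (detection_dict : List (String × Int)) : List (List Int) :=
  let by_group := (PySem.List.enumerate (ans_loc_dict.map Prod.snd)).foldl
      (fun m iv => m.modify iv.2 [] (fun l => l ++ [iv.1])) PySem.Dict.empty
  detection_dict.map (fun kv => by_group.getD kv.2 [])

-- ===== PRECONDITION & SPEC =====
def Spec_get_group_indices (ans_loc_dict : List (String × Int)) (detection_dict : List (String × Int)) (out : List (List Int)) : Prop := out = get_group_indices_alt ans_loc_dict detection_dict
instance (ans_loc_dict : List (String × Int)) (detection_dict : List (String × Int)) (out : List (List Int)) : Decidable (Spec_get_group_indices ans_loc_dict detection_dict out) := by unfold Spec_get_group_indices; infer_instance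

-- ===== CLAIM (what is proved, stated in full; the proofs are below) =====
def Claim_equal_get_group_indices : Prop := ∀ (ans_loc_dict : List (String × Int)) (detection_dict : List (String × Int)), Dom_get_group_indices ans_loc_dict detection_dict → Spec_get_group_indices ans_loc_dict detection_dict (get_group_indices ans_loc_dict detection_dict)

-- ===== LEMMAS AND PROOFS =====

-- ===== VERDICT (by name: the statement is the Claim_ definition above) =====
-- the grouping dict's entry at g is exactly the filtered indices
theorem getD_groupFold (xs : List (Int × Int)) (m0 : PySem.Dict Int (List Int)) (g : Int) :
    (xs.foldl (fun m iv => m.modify iv.2 [] (fun l => l ++ [iv.1])) m0).getD g []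
      = m0.getD g [] ++ (xs.filter (fun iv => iv.2 == g)).map (·.1) := by
  induction xs generalizing m0 with
  | nil => simp
  | cons x xs ih =>
    simp only [List.foldl_cons, List.filter_cons, ih]
    rw [PySem.Dict.getD_modify]
    by_cases h : x.2 = g
    · simp [h]
    · simp [h, Ne.symm h]

theorem get_group_indices_spec : Claim_equal_get_group_indices := by
  intro a d _
  unfold Spec_get_group_indices get_group_indices get_group_indices_alt
  rw [PySem.List.foldl_append_singleton_eq_map]
  apply List.map_congr_left
  intro kv _
  rw [getD_groupFold]
  simp
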